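-- pv_equiv track=rewrite | github.com/eldad1221/Open_u_python_course | mmn12.py | max_pos_seq
-- ===== SOURCE A (Python) =====
-- def max_pos_seq(lst):
--     """
--     Return the length of the longest contiguous subsequence of positive numbers in a list.
--
--     Args:
--         lst: A list of numeric values.
--
--     Returns:
--         int: The maximum number of consecutive elements in lst that are strictly greater than 0.
--     """
--     max_pos = 0
--     current_pos = 0
--     for num in lst:
--         if num > 0:
--             current_pos += 1
--             if current_pos > max_pos:
--                 max_pos = current_pos
--         else:
--             current_pos = 0
--     return max_pos
-- ===== SOURCE B (Python) =====
-- def max_pos_seq(lst):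
--     # Run-length encode the list into maximal same-key (x > 0) runs, then
--     # take the longest positive-keyed run (0 if there is none).
--     runs = []
--     i = 0
--     n = len(lst)
--     while i < n:
--         key = lst[i] > 0
--         j = i
--         while j < n and (lst[j] > 0) == key:
--             j += 1
--         runs.append((key, j - i))
--         i = j
--     return max((length for key, length in runs if key), default=0)
-- ===== Notes on version B (the rewrite author's own statement) =====
-- stated objective: alternative
-- what changed: B run-length encodes the list into maximal same-sign runs and then reduces over the positive-keyed runs to find the longest, instead of A's single running counter with an in-loop maximum.
import Mathlib
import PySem

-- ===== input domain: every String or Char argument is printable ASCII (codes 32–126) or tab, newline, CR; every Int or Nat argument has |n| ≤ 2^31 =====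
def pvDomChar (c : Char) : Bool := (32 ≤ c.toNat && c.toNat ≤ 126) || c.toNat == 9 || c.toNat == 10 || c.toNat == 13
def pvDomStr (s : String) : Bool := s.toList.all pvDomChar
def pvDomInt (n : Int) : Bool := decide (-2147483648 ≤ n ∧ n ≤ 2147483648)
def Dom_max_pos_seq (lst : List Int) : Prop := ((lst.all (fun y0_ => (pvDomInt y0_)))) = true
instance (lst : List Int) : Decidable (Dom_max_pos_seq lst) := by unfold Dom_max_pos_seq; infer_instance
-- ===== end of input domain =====

-- B replaces A's running counter by a run-length encoding of maximal same-sign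
-- runs followed by a reduction over the positive-keyed runs (alternative decomposition, same cost).


-- ===== PORT A =====
-- A's loop state is (max_pos, current_pos); the branches follow A's code in order.
def pvStepA (st : Int × Int) (num : Int) : Int × Int :=
  if num > 0 then
    if st.2 + 1 > st.1 then (st.2 + 1, st.2 + 1) else (st.1, st.2 + 1)
  else (st.1, 0)

def max_pos_seq (lst : List Int) : Int :=
  (lst.foldl pvStepA (0, 0)).1

-- ===== PORT B =====
-- Run-length encoding into maximal runs of equal key (x > 0); the inner
-- index scan of Source B is the takeWhile/dropWhile split at the same key.
def pvRuns (lst : List Int) : List (Bool × Int) :=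
  match lst with
  | [] => []
  | x :: xs =>
    let k := decide (x > 0)
    (k, ((xs.takeWhile (fun y => decide (y > 0) == k)).length : Int) + 1)
      :: pvRuns (xs.dropWhile (fun y => decide (y > 0) == k))
termination_by lst.length
decreasing_by
  simp only [List.length_cons]
  exact Nat.lt_succ_of_le (List.length_dropWhile_le _ _)

-- max(... for key, length in runs if key), default=0
def max_pos_seq_alt (lst : List Int) : Int :=
  (((pvRuns lst).filter (fun p => p.1)).map (fun p => p.2)).foldl (fun a b => max a b) 0

-- ===== PRECONDITION & SPEC =====
def Spec_max_pos_seq (lst : List Int) (out : Int) : Prop := out = max_pos_seq_alt lst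
instance (lst : List Int) (out : Int) : Decidable (Spec_max_pos_seq lst out) := by unfold Spec_max_pos_seq; infer_instance

-- ===== CLAIM (what is proved, stated in full; the proofs are below) =====
def Claim_equal_max_pos_seq : Prop := ∀ (lst : List Int), Dom_max_pos_seq lst → Spec_max_pos_seq lst (max_pos_seq lst)

-- ===== LEMMAS AND PROOFS =====

lemma pvStepA_pos (m c num : Int) (h : 0 < num) :
    pvStepA (m, c) num = (max m (c + 1), c + 1) := by
  simp only [pvStepA, if_pos h]
  split_ifs with h2 <;> simp <;> omega

lemma pvStepA_nonpos (m c num : Int) (h : ¬ 0 < num) :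
    pvStepA (m, c) num = (m, 0) := by
  simp [pvStepA, h]

-- A over a run of positives advances the counter by the run length and folds it into the max.
lemma pvA_pos_run (t : List Int) (ht : ∀ y ∈ t, 0 < y) :
    ∀ (r : List Int) (m c : Int), c ≤ m →
      List.foldl pvStepA (m, c) (t ++ r)
        = List.foldl pvStepA (max m (c + (t.length : Int)), c + (t.length : Int)) r := by
  induction t with
  | nil =>
    intro r m c hcm
    simp only [List.nil_append, List.length_nil, Nat.cast_zero, add_zero, max_eq_left hcm]
  | cons y t ih =>
    intro r m c hcm
    have hy : 0 < y := ht y (by simp)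
    simp only [List.cons_append, List.foldl_cons, pvStepA_pos m c y hy]
    rw [ih (fun z hz => ht z (by simp [hz])) r (max m (c + 1)) (c + 1) (le_max_right _ _)]
    have h1 : max (max m (c + 1)) (c + 1 + (t.length : Int))
        = max m (c + ((t.length : Int) + 1)) := by
      have : (0:Int) ≤ (t.length : Int) := Int.natCast_nonneg _
      omega
    have h2 : c + 1 + (t.length : Int) = c + ((t.length : Int) + 1) := by omega
    simp only [List.length_cons]
    push_cast
    rw [h2] at h1 ⊢
    rw [h1]

-- A over a run of nonpositives just keeps resetting the counter.
lemma pvA_nonpos_run (t : List Int) (ht : ∀ y ∈ t, ¬ 0 < y) :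
    ∀ (r : List Int) (m : Int),
      List.foldl pvStepA (m, 0) (t ++ r) = List.foldl pvStepA (m, 0) r := by
  induction t with
  | nil => intro r m; simp
  | cons y t ih =>
    intro r m
    have hy : ¬ 0 < y := ht y (by simp)
    simp only [List.cons_append, List.foldl_cons, pvStepA_nonpos m 0 y hy]
    exact ih (fun z hz => ht z (by simp [hz])) r m

lemma pvDropWhile_head_false {α : Type} (p : α → Bool) :
    ∀ (l : List α) (y : α) (ys : List α), l.dropWhile p = y :: ys → p y = false := by
  intro l
  induction l with
  | nil => intro y ys h; simp [List.dropWhile] at h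
  | cons a l ih =>
    intro y ys h
    by_cases hp : p a
    · rw [List.dropWhile_cons_of_pos hp] at h; exact ih y ys h
    · rw [List.dropWhile_cons_of_neg hp] at h
      cases h; exact Bool.of_not_eq_true hp

-- after a positive run the counter value is irrelevant: the next element (if any) resets it.
lemma pvReset (d : List Int) (hd : ∀ y ys, d = y :: ys → ¬ 0 < y) (M c : Int) :
    (List.foldl pvStepA (M, c) d).1 = (List.foldl pvStepA (M, 0) d).1 := by
  cases d with
  | nil => rfl
  | cons y ys =>
    have hy : ¬ 0 < y := hd y ys rfl
    simp only [List.foldl_cons, pvStepA_nonpos M c y hy, pvStepA_nonpos M 0 y hy]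

lemma pvBfold_cons (k : Bool) (v : Int) (rs : List (Bool × Int)) (m : Int) :
    (((((k, v) :: rs).filter (fun p => p.1)).map (fun p => p.2)).foldl (fun a b => max a b) m)
      = (((rs.filter (fun p => p.1)).map (fun p => p.2)).foldl (fun a b => max a b)
          (if k then max m v else m)) := by
  cases k <;> simp [List.filter]

lemma pvMain : ∀ (n : Nat) (l : List Int), l.length ≤ n → ∀ m : Int, 0 ≤ m →
    (List.foldl pvStepA (m, 0) l).1
      = (((pvRuns l).filter (fun p => p.1)).map (fun p => p.2)).foldl (fun a b => max a b) m := by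
  intro n
  induction n with
  | zero =>
    intro l hl m _
    have : l = [] := List.eq_nil_of_length_eq_zero (Nat.le_zero.mp hl)
    subst this; simp [pvRuns]
  | succ n ih =>
    intro l hl m hm
    cases l with
    | nil => simp [pvRuns]
    | cons x xs =>
      have hxs : xs.length ≤ n := by simpa using Nat.succ_le_succ_iff.mp hl
      by_cases hx : 0 < x
      · -- positive run
        have hk : decide (x > 0) = true := by simpa using hx
        set p : Int → Bool := fun y => decide (y > 0) == true with hp
        have hruns : pvRuns (x :: xs)
            = (true, ((xs.takeWhile p).length : Int) + 1) :: pvRuns (xs.dropWhile p) := by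
          rw [pvRuns]; simp only [hk, hp]
        have hsplit : xs = xs.takeWhile p ++ xs.dropWhile p := (List.takeWhile_append_dropWhile).symm
        have ht : ∀ y ∈ xs.takeWhile p, 0 < y := by
          intro y hy
          have := List.mem_takeWhile_imp hy
          simpa [hp] using this
        have hd : ∀ y ys, xs.dropWhile p = y :: ys → ¬ 0 < y := by
          intro y ys h
          have := pvDropWhile_head_false p xs y ys h
          simpa [hp] using this
        have hdlen : (xs.dropWhile p).length ≤ n :=
          le_trans (List.length_dropWhile_le _ _) hxs
        set T : Int := ((xs.takeWhile p).length : Int) with hT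
        have hT0 : 0 ≤ T := Int.natCast_nonneg _
        calc (List.foldl pvStepA (m, 0) (x :: xs)).1
            = (List.foldl pvStepA (max m 1, 1) xs).1 := by
              rw [List.foldl_cons, pvStepA_pos m 0 x hx]; norm_num
          _ = (List.foldl pvStepA (max (max m 1) (1 + T), 1 + T) (xs.dropWhile p)).1 := by
              conv_lhs => rw [hsplit]
              rw [pvA_pos_run (xs.takeWhile p) ht (xs.dropWhile p) (max m 1) 1 (le_max_right _ _)]
          _ = (List.foldl pvStepA (max m (T + 1), 1 + T) (xs.dropWhile p)).1 := by
              have : max (max m 1) (1 + T) = max m (T + 1) := by omega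
              rw [this]
          _ = (List.foldl pvStepA (max m (T + 1), 0) (xs.dropWhile p)).1 :=
              pvReset _ hd _ _
          _ = (((pvRuns (xs.dropWhile p)).filter (fun q => q.1)).map (fun q => q.2)).foldl
                (fun a b => max a b) (max m (T + 1)) :=
              ih (xs.dropWhile p) hdlen (max m (T + 1)) (by omega)
          _ = (((pvRuns (x :: xs)).filter (fun q => q.1)).map (fun q => q.2)).foldl
                (fun a b => max a b) m := by
              rw [hruns, pvBfold_cons]; simp [hT]
      · -- nonpositive run
        have hk : decide (x > 0) = false := by simpa using hx
        set p : Int → Bool := fun y => decide (y > 0) == false with hp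
        have hruns : pvRuns (x :: xs)
            = (false, ((xs.takeWhile p).length : Int) + 1) :: pvRuns (xs.dropWhile p) := by
          rw [pvRuns]; simp only [hk, hp]
        have hsplit : xs = xs.takeWhile p ++ xs.dropWhile p := (List.takeWhile_append_dropWhile).symm
        have ht : ∀ y ∈ xs.takeWhile p, ¬ 0 < y := by
          intro y hy
          have := List.mem_takeWhile_imp hy
          simpa [hp] using this
        have hdlen : (xs.dropWhile p).length ≤ n :=
          le_trans (List.length_dropWhile_le _ _) hxs
        calc (List.foldl pvStepA (m, 0) (x :: xs)).1
            = (List.foldl pvStepA (m, 0) xs).1 := by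
              rw [List.foldl_cons, pvStepA_nonpos m 0 x hx]
          _ = (List.foldl pvStepA (m, 0) (xs.dropWhile p)).1 := by
              conv_lhs => rw [hsplit]
              rw [pvA_nonpos_run (xs.takeWhile p) ht]
          _ = (((pvRuns (xs.dropWhile p)).filter (fun q => q.1)).map (fun q => q.2)).foldl
                (fun a b => max a b) m :=
              ih (xs.dropWhile p) hdlen m hm
          _ = (((pvRuns (x :: xs)).filter (fun q => q.1)).map (fun q => q.2)).foldl
                (fun a b => max a b) m := by
              rw [hruns, pvBfold_cons]; simp

-- ===== VERDICT (by name: the statement is the Claim_ definition above) =====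
theorem max_pos_seq_spec : Claim_equal_max_pos_seq := by
  intro lst _
  unfold Spec_max_pos_seq max_pos_seq max_pos_seq_alt
  exact pvMain lst.length lst le_rfl 0 le_rfl
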